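-- pv_equiv track=rewrite | github.com/Enstore-org/enstore | src/interface.py | underscore_to_dash
-- ===== SOURCE A (Python) =====
-- def underscore_to_dash(s):
--     # accept - rather than _ in arguments - but only in the keywords, not
--     # the values!
--     if s[:2] != '--':
--         return s
--     t = '--'
--     eq = 0
--     for c in s[2:]:
--         if c == '=':
--             eq = 1
--         if c == '_' and not eq:
--             c = '-'
--         t = t + c
--     return t
-- ===== SOURCE B (Python) =====
-- def underscore_to_dash(s):
--     if s[:2] != '--':
--         return s
--     head, sep, tail = s[2:].partition('=')
--     return '--' + head.replace('_', '-') + sep + tail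
-- ===== Notes on version B (the rewrite author's own statement) =====
-- stated objective: simpler
-- what changed: Replaces the char-by-char accumulator loop with a latch flag by a single partition at the first equals sign followed by str.replace on the keyword half.
import Mathlib
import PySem

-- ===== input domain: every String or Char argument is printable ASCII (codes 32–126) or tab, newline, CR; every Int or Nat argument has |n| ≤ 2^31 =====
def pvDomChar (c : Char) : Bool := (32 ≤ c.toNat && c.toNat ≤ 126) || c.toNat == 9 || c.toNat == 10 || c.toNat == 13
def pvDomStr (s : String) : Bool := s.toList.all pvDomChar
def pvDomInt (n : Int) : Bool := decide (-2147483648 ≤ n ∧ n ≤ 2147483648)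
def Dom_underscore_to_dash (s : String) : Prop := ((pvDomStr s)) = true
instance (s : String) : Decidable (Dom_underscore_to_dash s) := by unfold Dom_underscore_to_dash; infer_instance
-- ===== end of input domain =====

-- B replaces A's char-by-char accumulator loop (with an 'eq' latch flag) by one
-- partition at the first equals sign plus a replace on the keyword half (objective: simpler).

-- ===== PORT A =====
-- the loop 'for c in s[2:]: …', state = (t, eq); eq is updated before the '_' test,
-- exactly as in Python (harmless since '=' ≠ '_').
def utdLoop : List Char → List Char → Bool → List Char
  | [], t, _ => t
  | c :: rest, t, eq =>
    let eq' := if c = '=' then true else eq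
    let c' := if c = '_' ∧ eq' = false then '-' else c
    utdLoop rest (t ++ [c']) eq'

def underscore_to_dash (s : String) : String :=
  if s.toList.take 2 ≠ ['-', '-'] then s
  else String.ofList (utdLoop (s.toList.drop 2) ['-', '-'] false)

-- ===== PORT B =====
-- partition('=') = (takeWhile (≠'='), dropWhile (≠'=')) where the second part carries
-- the separator; head.replace('_','-') is a map on the keyword half.
def underscore_to_dash_alt (s : String) : String :=
  if s.toList.take 2 ≠ ['-', '-'] then s
  else
    let r := s.toList.drop 2
    let head := r.takeWhile (· ≠ '=')
    let sepTail := r.dropWhile (· ≠ '=')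
    String.ofList ('-' :: '-' :: (head.map (fun c => if c = '_' then '-' else c) ++ sepTail))

-- ===== PRECONDITION & SPEC =====
def Spec_underscore_to_dash (s : String) (out : String) : Prop := out = underscore_to_dash_alt s
instance (s : String) (out : String) : Decidable (Spec_underscore_to_dash s out) := by unfold Spec_underscore_to_dash; infer_instance

-- ===== CLAIM (what is proved, stated in full; the proofs are below) =====
def Claim_equal_underscore_to_dash : Prop := ∀ (s : String), Dom_underscore_to_dash s → Spec_underscore_to_dash s (underscore_to_dash s)

-- ===== LEMMAS AND PROOFS =====

-- once the latch is set, the loop copies the rest verbatim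
theorem utdLoop_true (l : List Char) : ∀ (t : List Char), utdLoop l t true = t ++ l := by
  induction l with
  | nil => intro t; simp [utdLoop]
  | cons c rest ih =>
    intro t
    simp only [utdLoop]
    have : (if c = '=' then true else true) = true := by split <;> rfl
    rw [this]
    have hc : (if c = '_' ∧ (true : Bool) = false then '-' else c) = c := by
      split
      · next h => exact absurd h.2 (by simp)
      · rfl
    rw [hc, ih]
    simp

-- before the latch is set, the loop computes: replaced keyword part ++ rest from first '='
theorem utdLoop_false (l : List Char) : ∀ (t : List Char),
    utdLoop l t false =
      t ++ (l.takeWhile (· ≠ '=')).map (fun c => if c = '_' then '-' else c)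
        ++ l.dropWhile (· ≠ '=') := by
  induction l with
  | nil => intro t; simp [utdLoop]
  | cons c rest ih =>
    intro t
    by_cases h : c = '='
    · subst h
      simp [utdLoop, utdLoop_true]
    · by_cases hu : c = '_' <;>
        simp [utdLoop, h, hu, ih]

-- ===== VERDICT (by name: the statement is the Claim_ definition above) =====
theorem underscore_to_dash_spec : Claim_equal_underscore_to_dash := by
  intro s _
  unfold Spec_underscore_to_dash underscore_to_dash underscore_to_dash_alt
  by_cases h : s.toList.take 2 ≠ ['-', '-']
  · rw [if_pos h, if_pos h]
  · rw [if_neg h, if_neg h]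
    rw [utdLoop_false]
    rfl
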